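-- pv_equiv track=rewrite | github.com/fruitBohl/collatz | src/thesis/swapping_sums.py | sum_phi_diff2
-- ===== SOURCE A (Python) =====
-- from math import floor
--
-- def isPrime(n):
--     if n < 2:
--         return False
--     for i in range(2, n + 1):
--         if i * i <= n and n % i == 0:
--             return False
--     return True
--
-- def mobius(N):
--     if N == 1:
--         return 1
--
--     p = 0
--     for i in range(1, N + 1):
--         if N % i == 0 and isPrime(i):
--             if N % (i * i) == 0:
--                 return 0
--             else:
--                 p = p + 1
--
--     if p % 2 != 0:
--         return -1
--     else:
--         return 1
--
-- def sum_phi_diff2(n: int) -> int: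
--     """Euler phi function in summation notation"""
--
--     phi_sum = sum(
--         [
--             mobius(m) * sum(d for d in [i for i in range(1, floor(n / m) + 1)])
--             for m in range(1, n + 1)
--         ]
--     )
--
--     return int(phi_sum)
-- ===== SOURCE B (Python) =====
-- def _mobius(n):
--     # Moebius function by trial division: O(sqrt(n)).
--     mu = 1
--     d = 2
--     while d * d <= n:
--         if n % d == 0:
--             n //= d
--             if n % d == 0:
--                 return 0
--             mu = -mu
--         d += 1
--     if n > 1:
--         mu = -mu
--     return mu
--
-- def sum_phi_diff2(n: int) -> int:
--     """Euler phi function in summation notation"""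
--     total = 0
--     for m in range(1, n + 1):
--         k = n // m
--         total += _mobius(m) * (k * (k + 1) // 2)
--     return total
-- ===== Notes on version B (the rewrite author's own statement) =====
-- stated objective: faster
-- what changed: mobius(m) is computed by trial division up to sqrt(m) (stripping factors, early 0 on a square factor) instead of scanning every i<=m with a full trial-division primality test, and the inner sum 1+...+k is replaced by the closed form k*(k+1)//2
import Mathlib
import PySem

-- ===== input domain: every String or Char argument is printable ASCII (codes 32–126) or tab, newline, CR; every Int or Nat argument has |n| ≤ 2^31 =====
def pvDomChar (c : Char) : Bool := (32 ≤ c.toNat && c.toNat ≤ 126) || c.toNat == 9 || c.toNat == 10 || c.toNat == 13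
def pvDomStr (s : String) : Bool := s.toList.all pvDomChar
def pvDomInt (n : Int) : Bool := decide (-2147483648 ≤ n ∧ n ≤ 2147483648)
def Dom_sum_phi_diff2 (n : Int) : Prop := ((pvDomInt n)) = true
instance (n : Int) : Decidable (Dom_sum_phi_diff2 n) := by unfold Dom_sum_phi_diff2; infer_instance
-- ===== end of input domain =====

-- B computes each mobius(m) by trial division up to sqrt(m) and the inner sum 1+...+k by the
-- closed form k*(k+1)//2, instead of A's scan of every i ≤ m with a trial-division primality
-- test and an explicit summation loop (objective: faster).

-- ===== PORT A =====
def pyIsPrime (n : Int) : Bool :=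
  if n < 2 then false
  else (PySem.List.pyRange 2 (n+1) 1).all (fun i => !(decide (i*i ≤ n) && decide (PySem.Int.mod n i = 0)))

def mobiusALoop (N : Int) : List Int → Int → Int
  | [], p => if PySem.Int.mod p 2 ≠ 0 then -1 else 1
  | i :: rest, p =>
    if PySem.Int.mod N i = 0 ∧ pyIsPrime i = true then
      (if PySem.Int.mod N (i*i) = 0 then 0 else mobiusALoop N rest (p+1))
    else mobiusALoop N rest p

def mobiusA (N : Int) : Int :=
  if N = 1 then 1 else mobiusALoop N (PySem.List.pyRange 1 (N+1) 1) 0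

-- floor(n / m): Python does float division then floor; exact as integer floor division here
-- (|n| ≤ 2^31 < 2^53 on Dom and 1 ≤ m, so the float result floors to n // m)
def sum_phi_diff2 (n : Int) : Int :=
  ((PySem.List.pyRange 1 (n+1) 1).map (fun m =>
    mobiusA m * ((PySem.List.pyRange 1 (PySem.Int.floordiv n m + 1) 1).map (fun d => d)).sum)).sum

-- ===== PORT B =====
-- Source B's while-loop, made total with fuel; fuel = n.toNat + 2 never runs out: the loop runs
-- only while d*d ≤ n with d incremented every pass from 2, so it makes at most n passes
def mobiusBLoop : Nat → Int → Int → Int → Int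
  | 0, n, _, mu => if 1 < n then -mu else mu
  | fuel+1, n, d, mu =>
    if d * d ≤ n then
      (if PySem.Int.mod n d = 0 then
        (if PySem.Int.mod (PySem.Int.floordiv n d) d = 0 then 0
         else mobiusBLoop fuel (PySem.Int.floordiv n d) (d+1) (-mu))
       else mobiusBLoop fuel n (d+1) mu)
    else if 1 < n then -mu else mu

def mobiusB (n : Int) : Int := mobiusBLoop (n.toNat + 2) n 2 1

def sum_phi_diff2_alt (n : Int) : Int :=
  (PySem.List.pyRange 1 (n+1) 1).foldl (fun total m =>
    total + mobiusB m * PySem.Int.floordiv (PySem.Int.floordiv n m * (PySem.Int.floordiv n m + 1)) 2) 0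

-- ===== PRECONDITION & SPEC =====
def Spec_sum_phi_diff2 (n : Int) (out : Int) : Prop := out = sum_phi_diff2_alt n
instance (n : Int) (out : Int) : Decidable (Spec_sum_phi_diff2 n out) := by unfold Spec_sum_phi_diff2; infer_instance

-- ===== CLAIM (what is proved, stated in full; the proofs are below) =====
def Claim_equal_sum_phi_diff2 : Prop := ∀ (n : Int), Dom_sum_phi_diff2 n → Spec_sum_phi_diff2 n (sum_phi_diff2 n)

-- ===== LEMMAS AND PROOFS =====

-- both mobius implementations are proved equal to this closed-form specification
def mspec (n : Nat) : Int := if Squarefree n then (-1) ^ n.primeFactors.card else 0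

-- the test A's mobius loop applies to each i (divides N, and is prime)
def condA (N i : Int) : Bool := decide (PySem.Int.mod N i = 0) && pyIsPrime i

lemma pyIsPrime_iff (i : Int) : pyIsPrime i = true ↔ 2 ≤ i ∧ Nat.Prime i.toNat := by
  unfold pyIsPrime
  by_cases h2 : i < 2
  · simp only [if_pos h2]
    constructor
    · intro h; exact absurd h (by simp)
    · rintro ⟨h,-⟩; omega
  · have hi : (i.toNat : Int) = i := Int.toNat_of_nonneg (by omega)
    simp only [if_neg (by omega : ¬ i < 2), List.all_eq_true, PySem.List.mem_pyRange_one]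
    constructor
    · intro h
      refine ⟨by omega, ?_⟩
      rw [Nat.prime_def_le_sqrt]
      refine ⟨by omega, fun m hm hsq hd => ?_⟩
      have hmm : m * m ≤ i.toNat := Nat.le_sqrt.mp hsq
      have hcast : ((m*m : Nat) : Int) = (m:Int)*(m:Int) := by push_cast; ring
      have hle : m ≤ m*m := Nat.le_mul_of_pos_left m (by omega)
      have := h (m : Int) ⟨by exact_mod_cast hm, by omega⟩
      simp only [Bool.not_eq_true', Bool.and_eq_false_iff, decide_eq_false_iff_not] at this
      rcases this with h' | h'
      · apply h'; omega
      · apply h'; rw [PySem.Int.mod_eq_zero_iff_dvd]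
        have : (m : Int) ∣ (i.toNat : Int) := by exact_mod_cast hd
        rwa [hi] at this
    · rintro ⟨-, hp⟩ j ⟨hj2, hji⟩
      have hj : (j.toNat : Int) = j := Int.toNat_of_nonneg (by omega)
      simp only [Bool.not_eq_true', Bool.and_eq_false_iff, decide_eq_false_iff_not]
      by_cases hsq : j * j ≤ i
      · right
        rw [PySem.Int.mod_eq_zero_iff_dvd]
        intro hd
        rw [Nat.prime_def_le_sqrt] at hp
        apply hp.2 j.toNat (by omega) (Nat.le_sqrt.mpr (by zify; rw [hj, hi]; exact hsq))
        have : (j.toNat : Int) ∣ (i.toNat : Int) := by rw [hj, hi]; exact hd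
        exact_mod_cast this
      · left; exact hsq

-- A's loop returns 0 as soon as some prime divisor's square divides N; otherwise the sign
-- of the number of prime divisors it counted (order-independent characterisation)
lemma mobiusALoop_eq (N : Int) (l : List Int) (p : Int) :
    mobiusALoop N l p =
      if l.any (fun i => condA N i && decide (PySem.Int.mod N (i*i) = 0)) then 0
      else (if PySem.Int.mod (p + l.countP (condA N)) 2 ≠ 0 then -1 else 1) := by
  induction l generalizing p with
  | nil => simp [mobiusALoop]
  | cons i rest ih =>
    by_cases hc : PySem.Int.mod N i = 0 ∧ pyIsPrime i = true
    · have hcb : condA N i = true := by simp [condA, hc.1, hc.2]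
      by_cases hs : PySem.Int.mod N (i*i) = 0
      · rw [mobiusALoop, if_pos hc, if_pos hs, List.any_cons, hcb]
        simp [hs]
      · have hhead : (condA N i && decide (PySem.Int.mod N (i*i) = 0)) = false := by
          simp [hs]
        rw [mobiusALoop, if_pos hc, if_neg hs, ih, List.any_cons, hhead, Bool.false_or,
          List.countP_cons, hcb]
        have harg : p + 1 + (List.countP (condA N) rest : Int)
            = p + ((List.countP (condA N) rest + (if (true : Bool) = true then 1 else 0) : Nat) : Int) := by
          push_cast
          rw [if_pos rfl]
          ring
        rw [harg]
    · have hcb : condA N i = false := by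
        by_contra h
        rw [Bool.not_eq_false, condA, Bool.and_eq_true, decide_eq_true_eq] at h
        exact hc ⟨h.1, h.2⟩
      rw [mobiusALoop, if_neg hc, ih, List.any_cons, List.countP_cons, hcb]
      simp

lemma condA_nat_iff (N : Int) (hN : 1 ≤ N) (k : Nat) :
    condA N (k : Int) = true ↔ k.Prime ∧ k ∣ N.toNat := by
  have hNt : (N.toNat : Int) = N := Int.toNat_of_nonneg (by omega)
  rw [condA, Bool.and_eq_true, decide_eq_true_eq, PySem.Int.mod_eq_zero_iff_dvd, pyIsPrime_iff]
  constructor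
  · rintro ⟨hdvd, -, hp⟩
    refine ⟨by simpa using hp, ?_⟩
    have : (k : Int) ∣ (N.toNat : Int) := by rwa [hNt]
    exact_mod_cast this
  · rintro ⟨hp, hdvd⟩
    have h2 : 2 ≤ k := hp.two_le
    refine ⟨?_, by exact_mod_cast h2, by simpa using hp⟩
    rw [← hNt]; exact_mod_cast hdvd

lemma countA_eq_card (N : Int) (hN : 1 ≤ N) :
    (PySem.List.pyRange 1 (N+1) 1).countP (condA N) = N.toNat.primeFactors.card := by
  have h0 : PySem.List.pyRange 0 (N+1) 1 = 0 :: PySem.List.pyRange 1 (N+1) 1 :=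
    PySem.List.pyRange_one_cons (by omega)
  have hc0 : condA N 0 = false := by
    by_contra h
    rw [Bool.not_eq_false] at h
    have := (pyIsPrime_iff 0).mp ((Bool.and_eq_true _ _).mp h).2
    omega
  have hcount : (PySem.List.pyRange 0 (N+1) 1).countP (condA N)
      = (PySem.List.pyRange 1 (N+1) 1).countP (condA N) := by
    rw [h0, List.countP_cons, hc0]; simp
  rw [← hcount, PySem.List.pyRange_zero, List.countP_map]
  have : ((Finset.range ((N+1).toNat)).filter (fun k : Nat => condA N (k : Int) = true)).card
      = N.toNat.primeFactors.card := by
    congr 1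
    apply Finset.ext
    intro k
    simp only [Finset.mem_filter, Finset.mem_range, Nat.mem_primeFactors,
      condA_nat_iff N hN k]
    constructor
    · rintro ⟨-, hp, hd⟩; exact ⟨hp, hd, by omega⟩
    · rintro ⟨hp, hd, -⟩
      have := Nat.le_of_dvd (by omega) hd
      exact ⟨by omega, hp, hd⟩
  rw [← this]
  simp [Finset.filter, Finset.range, Multiset.range, Multiset.filter_coe,
    List.countP_eq_length_filter]
  rfl

lemma anyA_iff (N : Int) (hN : 1 ≤ N) :
    (PySem.List.pyRange 1 (N+1) 1).any (fun i => condA N i && decide (PySem.Int.mod N (i*i) = 0)) = true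
      ↔ ¬ Squarefree N.toNat := by
  have hNt : (N.toNat : Int) = N := Int.toNat_of_nonneg (by omega)
  rw [List.any_eq_true, Nat.squarefree_iff_prime_squarefree]
  constructor
  · rintro ⟨i, hmem, hb⟩
    rw [PySem.List.mem_pyRange_one] at hmem
    rw [Bool.and_eq_true, condA, Bool.and_eq_true, decide_eq_true_eq, decide_eq_true_eq,
      PySem.Int.mod_eq_zero_iff_dvd, PySem.Int.mod_eq_zero_iff_dvd] at hb
    obtain ⟨⟨-, hp⟩, hsq⟩ := hb
    have hp' := (pyIsPrime_iff i).mp hp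
    push Not
    refine ⟨i.toNat, hp'.2, ?_⟩
    have : ((i.toNat * i.toNat : Nat) : Int) ∣ (N.toNat : Int) := by
      push_cast
      rw [Int.toNat_of_nonneg (by omega : (0:Int) ≤ i), hNt]
      exact hsq
    exact_mod_cast this
  · intro h
    push Not at h
    obtain ⟨p, hp, hsq⟩ := h
    refine ⟨(p : Int), ?_, ?_⟩
    · rw [PySem.List.mem_pyRange_one]
      have hdvd : p ∣ N.toNat := dvd_trans (Dvd.intro p rfl) hsq
      have := Nat.le_of_dvd (by omega) hdvd
      have h2 := hp.two_le
      omega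
    · have hdvd : p ∣ N.toNat := dvd_trans (Dvd.intro p rfl) hsq
      rw [Bool.and_eq_true, condA, Bool.and_eq_true, decide_eq_true_eq, decide_eq_true_eq,
        PySem.Int.mod_eq_zero_iff_dvd, PySem.Int.mod_eq_zero_iff_dvd]
      refine ⟨⟨?_, ?_⟩, ?_⟩
      · rw [← hNt]; exact_mod_cast hdvd
      · rw [pyIsPrime_iff]
        refine ⟨by exact_mod_cast hp.two_le, by simpa using hp⟩
      · have : ((p * p : Nat) : Int) ∣ (N.toNat : Int) := by exact_mod_cast hsq
        rw [hNt] at this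
        push_cast at this
        exact this

lemma mspec_one : mspec 1 = 1 := by simp [mspec, Nat.primeFactors_one]

lemma mobiusA_eq (N : Int) (hN : 1 ≤ N) : mobiusA N = mspec N.toNat := by
  by_cases h1 : N = 1
  · simp [mobiusA, h1, mspec_one]
  · rw [mobiusA, if_neg h1, mobiusALoop_eq]
    by_cases hany : (PySem.List.pyRange 1 (N+1) 1).any
        (fun i => condA N i && decide (PySem.Int.mod N (i*i) = 0)) = true
    · rw [if_pos hany, mspec, if_neg ((anyA_iff N hN).mp hany)]
    · rw [if_neg hany, countA_eq_card N hN]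
      have hsq : Squarefree N.toNat := by
        by_contra h
        exact hany ((anyA_iff N hN).mpr h)
      rw [mspec, if_pos hsq]
      set c := N.toNat.primeFactors.card
      rw [zero_add, PySem.Int.mod_eq_emod_of_pos (by omega)]
      rcases Nat.even_or_odd c with he | ho
      · rw [he.neg_one_pow, if_neg]
        simp only [ne_eq, Decidable.not_not]
        obtain ⟨t, ht⟩ := he
        omega
      · rw [ho.neg_one_pow, if_pos]
        obtain ⟨t, ht⟩ := ho
        omega

lemma mspec_prime {p : Nat} (hp : p.Prime) : mspec p = -1 := by
  simp [mspec, hp.squarefree, hp.primeFactors]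

lemma mspec_mul_prime {p k : Nat} (hp : p.Prime) (hnd : ¬ p ∣ k) (hk : 1 ≤ k) :
    mspec (p * k) = - mspec k := by
  have hcop : p.Coprime k := (Nat.Prime.coprime_iff_not_dvd hp).mpr hnd
  by_cases hsk : Squarefree k
  · have hsq : Squarefree (p * k) := (Nat.squarefree_mul hcop).mpr ⟨hp.squarefree, hsk⟩
    have hnm : p ∉ k.primeFactors := fun h => hnd (Nat.mem_primeFactors.mp h).2.1
    have hcard : (p * k).primeFactors.card = k.primeFactors.card + 1 := by
      rw [Nat.primeFactors_mul hp.pos.ne' (by omega), hp.primeFactors,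
        Finset.singleton_union, Finset.card_insert_of_notMem hnm]
    rw [mspec, mspec, if_pos hsq, if_pos hsk, hcard, pow_succ]
    ring
  · have hns : ¬ Squarefree (p * k) := fun h => hsk ((Nat.squarefree_mul hcop).mp h).2
    rw [mspec, mspec, if_neg hns, if_neg hsk]
    ring

-- if n ≥ 2 has no prime factor < d and n < d*d then n is prime (B's after-loop case)
lemma exit_prime (n d : Int) (hn : 2 ≤ n) (hd : 2 ≤ d)
    (hinv : ∀ p : Nat, p.Prime → (p : Int) < d → ¬ (p : Int) ∣ n)
    (hlt : n < d * d) : Nat.Prime n.toNat := by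
  have hnt : (n.toNat : Int) = n := Int.toNat_of_nonneg (by omega)
  set q := n.toNat.minFac with hqdef
  have hq : q.Prime := Nat.minFac_prime (by omega)
  have hqdvdN : q ∣ n.toNat := Nat.minFac_dvd _
  have hqdvd : (q : Int) ∣ n := by rw [← hnt]; exact_mod_cast hqdvdN
  have hdq : d ≤ (q : Int) := by
    by_contra h
    exact hinv q hq (by omega) hqdvd
  obtain ⟨k, hk⟩ := hqdvdN
  by_cases hk1 : k = 1
  · rw [hk1, mul_one] at hk; rw [hk]; exact hq
  · exfalso
    have hk0 : k ≠ 0 := by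
      intro h; rw [h, mul_zero] at hk; omega
    have hr : k.minFac.Prime := Nat.minFac_prime hk1
    have hrdvdN : k.minFac ∣ n.toNat := dvd_trans (Nat.minFac_dvd k) (Dvd.intro_left q hk.symm)
    have hrdvd : (k.minFac : Int) ∣ n := by rw [← hnt]; exact_mod_cast hrdvdN
    have hdr : d ≤ (k.minFac : Int) := by
      by_contra h
      exact hinv k.minFac hr (by omega) hrdvd
    have hrk : k.minFac ≤ k := Nat.minFac_le (by omega)
    have : n.toNat ≥ q * k.minFac := by
      calc n.toNat = q * k := hk
        _ ≥ q * k.minFac := Nat.mul_le_mul_left q hrk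
    have hqk : (q : Int) * (k.minFac : Int) ≤ n := by
      rw [← hnt]; exact_mod_cast this
    have : d * d ≤ (q : Int) * (k.minFac : Int) :=
      mul_le_mul hdq hdr (by omega) (by omega)
    omega

-- invariant proof for B's trial-division loop: if no prime below d divides n and the fuel
-- dominates n + 2 - d, the loop computes mu * mspec n
lemma mobiusBLoop_eq (fuel : Nat) (n d mu : Int) (hn : 1 ≤ n) (hd : 2 ≤ d)
    (hinv : ∀ p : Nat, p.Prime → (p : Int) < d → ¬ (p : Int) ∣ n)
    (hfuel : n + 2 ≤ d + fuel) :
    mobiusBLoop fuel n d mu = mu * mspec n.toNat := by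
  induction fuel generalizing n d mu with
  | zero =>
    have hf : n + 2 ≤ d := by push_cast at hfuel; omega
    have hlt : n < d * d := by nlinarith [mul_le_mul_of_nonneg_left hd (show (0:Int) ≤ d by omega)]
    rw [mobiusBLoop]
    by_cases h1 : 1 < n
    · rw [if_pos h1, mspec_prime (exit_prime n d (by omega) hd hinv hlt)]
      ring
    · have : n = 1 := by omega
      rw [if_neg h1, this]
      simp [mspec_one]
  | succ fuel ih =>
    rw [mobiusBLoop]
    by_cases hdd : d * d ≤ n
    · rw [if_pos hdd]
      by_cases hmod : PySem.Int.mod n d = 0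
      · rw [if_pos hmod]
        rw [PySem.Int.mod_eq_zero_iff_dvd] at hmod
        have hdp : Nat.Prime d.toNat := by
          have hdt : (d.toNat : Int) = d := Int.toNat_of_nonneg (by omega)
          by_contra h
          have hm := Nat.minFac_prime (show d.toNat ≠ 1 by omega)
          have hmlt : d.toNat.minFac < d.toNat := by
            have hle : d.toNat.minFac ≤ d.toNat := Nat.minFac_le (by omega)
            rcases Nat.lt_or_ge d.toNat.minFac d.toNat with h' | h'
            · exact h'
            · exfalso
              have : d.toNat.minFac = d.toNat := by omega
              exact h (by rw [← this]; exact hm)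
          have hmdvd : (d.toNat.minFac : Int) ∣ n := by
            have h1 : (d.toNat.minFac : Int) ∣ (d.toNat : Int) := by
              exact_mod_cast Nat.minFac_dvd d.toNat
            rw [hdt] at h1
            exact dvd_trans h1 hmod
          exact hinv d.toNat.minFac hm (by omega) hmdvd
        set n' := PySem.Int.floordiv n d with hn'def
        have hfd : n' = n / d := PySem.Int.floordiv_eq_ediv_of_pos (by omega)
        have hmul : d * n' = n := by rw [hfd]; exact Int.mul_ediv_cancel' hmod
        have hn'1 : 1 ≤ n' := by
          rcases Int.lt_or_le n' 1 with h | h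
          · exfalso; nlinarith
          · exact h
        by_cases hmod2 : PySem.Int.mod n' d = 0
        · rw [if_pos hmod2]
          rw [PySem.Int.mod_eq_zero_iff_dvd] at hmod2
          have hsqdvd : d * d ∣ n := by
            obtain ⟨t, ht⟩ := hmod2
            exact ⟨t, by rw [← hmul, ht]; ring⟩
          have hns : ¬ Squarefree n.toNat := by
            rw [Nat.squarefree_iff_prime_squarefree]
            push Not
            refine ⟨d.toNat, hdp, ?_⟩
            have hnt : (n.toNat : Int) = n := Int.toNat_of_nonneg (by omega)
            have : ((d.toNat * d.toNat : Nat) : Int) ∣ (n.toNat : Int) := by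
              push_cast
              rw [Int.toNat_of_nonneg (by omega : (0:Int) ≤ d), hnt]
              exact hsqdvd
            exact_mod_cast this
          rw [mspec, if_neg hns]
          ring
        · rw [if_neg hmod2]
          rw [PySem.Int.mod_eq_zero_iff_dvd] at hmod2
          have hinv' : ∀ p : Nat, p.Prime → (p : Int) < d + 1 → ¬ (p : Int) ∣ n' := by
            intro p hp hplt hpdvd
            rcases Int.lt_or_le (p : Int) d with h | h
            · exact hinv p hp h (dvd_trans hpdvd (Dvd.intro_left d hmul))
            · have : (p : Int) = d := by omega
              rw [this] at hpdvd
              exact hmod2 hpdvd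
          have h2n' : 2 * n' ≤ n := by nlinarith
          have := ih n' (d+1) (-mu) hn'1 (by omega) hinv' (by push_cast at hfuel ⊢; omega)
          rw [this]
          have hnn : n.toNat = d.toNat * n'.toNat := by
            have : ((d.toNat * n'.toNat : Nat) : Int) = n := by
              push_cast
              rw [Int.toNat_of_nonneg (by omega : (0:Int) ≤ d),
                Int.toNat_of_nonneg (by omega : (0:Int) ≤ n')]
              exact hmul
            omega
          have hndvd : ¬ d.toNat ∣ n'.toNat := by
            intro h
            apply hmod2
            have : (d.toNat : Int) ∣ (n'.toNat : Int) := by exact_mod_cast h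
            rwa [Int.toNat_of_nonneg (by omega : (0:Int) ≤ d),
              Int.toNat_of_nonneg (by omega : (0:Int) ≤ n')] at this
          rw [hnn, mspec_mul_prime hdp hndvd (by omega)]
          ring
      · rw [if_neg hmod]
        have hinv' : ∀ p : Nat, p.Prime → (p : Int) < d + 1 → ¬ (p : Int) ∣ n := by
          intro p hp hplt hpdvd
          rcases Int.lt_or_le (p : Int) d with h | h
          · exact hinv p hp h hpdvd
          · have : (p : Int) = d := by omega
            rw [this] at hpdvd
            exact hmod ((PySem.Int.mod_eq_zero_iff_dvd n d).mpr hpdvd)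
        exact ih n (d+1) mu hn (by omega) hinv' (by push_cast at hfuel ⊢; omega)
    · rw [if_neg hdd]
      push Not at hdd
      by_cases h1 : 1 < n
      · rw [if_pos h1, mspec_prime (exit_prime n d (by omega) hd hinv hdd)]
        ring
      · have : n = 1 := by omega
        rw [if_neg h1, this]
        simp [mspec_one]

lemma mobiusB_eq (n : Int) (hn : 1 ≤ n) : mobiusB n = mspec n.toNat := by
  have := mobiusBLoop_eq (n.toNat + 2) n 2 1 hn (by omega)
    (fun p hp hlt hdvd => by
      have : 2 ≤ (p : Int) := by exact_mod_cast hp.two_le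
      omega)
    (by push_cast; omega)
  simpa [mobiusB] using this

lemma mobiusAB (m : Int) (hm : 1 ≤ m) : mobiusA m = mobiusB m := by
  rw [mobiusA_eq m hm, mobiusB_eq m hm]

lemma tri_two (K : Nat) :
    2 * ((PySem.List.pyRange 1 ((K:Int)+1) 1).map (fun d => d)).sum = (K:Int)*((K:Int)+1) := by
  induction K with
  | zero => simp
  | succ K ih =>
    have hstep : PySem.List.pyRange 1 ((K:Int)+1+1) 1
        = PySem.List.pyRange 1 ((K:Int)+1) 1 ++ [(K:Int)+1] := by
      have := PySem.List.pyRange_one_succ_right (a := 1) (b := (K:Int)+1) (by omega)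
      simpa using this
    push_cast
    rw [hstep, List.map_append, List.sum_append, mul_add]
    rw [ih]
    simp
    ring

lemma tri_sum (k : Int) (hk : 0 ≤ k) :
    ((PySem.List.pyRange 1 (k+1) 1).map (fun d => d)).sum = PySem.Int.floordiv (k*(k+1)) 2 := by
  obtain ⟨K, rfl⟩ : ∃ K : Nat, k = (K : Int) := ⟨k.toNat, by omega⟩
  rw [PySem.Int.floordiv_eq_ediv_of_pos (by omega : (0:Int) < 2), ← tri_two K,
    Int.mul_ediv_cancel_left _ (by norm_num)]

-- ===== VERDICT (by name: the statement is the Claim_ definition above) =====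
theorem sum_phi_diff2_spec : Claim_equal_sum_phi_diff2 := by
  intro n _
  unfold Spec_sum_phi_diff2 sum_phi_diff2 sum_phi_diff2_alt
  rw [PySem.List.foldl_add, zero_add]
  congr 1
  apply List.map_congr_left
  intro m hm
  rw [PySem.List.mem_pyRange_one] at hm
  have hk : 0 ≤ PySem.Int.floordiv n m := by
    rw [PySem.Int.floordiv_eq_ediv_of_pos (by omega)]
    exact Int.ediv_nonneg (by omega) (by omega)
  rw [mobiusAB m hm.1, tri_sum _ hk]
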